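-- pv_equiv track=rewrite | github.com/Festorah/cisd | dashboard/utils/file_processors.py | _parse_content_to_sections
-- ===== SOURCE A (Python) =====
-- from typing import Any, Dict, List
--
-- def _parse_content_to_sections(text: str) -> List[Dict[str, Any]]:
--     """Parse text content into structured sections"""
--     sections = []
--     lines = text.split("\n")
--     current_section = {"type": "paragraph", "content": ""}
--
--     for line in lines:
--         line = line.strip()
--         if not line:
--             continue
--
--         # Detect headings (lines that are short and might be titles)
--         if (
--             len(line) < 100
--             and line.isupper()
--             or (len(line.split()) <= 8 and not line.endswith("."))
--         ):
--             # Save current section if it has content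
--             if current_section["content"].strip():
--                 sections.append(current_section)
--
--             # Start new heading section
--             sections.append({"type": "heading", "content": line, "title": line})
--             current_section = {"type": "paragraph", "content": ""}
--         else:
--             # Add to current paragraph
--             current_section["content"] += line + " "
--
--     # Add final section
--     if current_section["content"].strip():
--         sections.append(current_section)
--
--     return sections
-- ===== SOURCE B (Python) =====
-- from itertools import groupby
-- from typing import Any, Dict, List
--
--
-- def _is_heading(line: str) -> bool:
--     # same (unparenthesised-precedence) condition as the original
--     return (
--         len(line) < 100
--         and line.isupper()
--         or (len(line.split()) <= 8 and not line.endswith("."))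
--     )
--
--
-- def _parse_content_to_sections(text: str) -> List[Dict[str, Any]]:
--     """Parse text content into structured sections"""
--     lines = [s for s in (raw.strip() for raw in text.split("\n")) if s]
--     sections: List[Dict[str, Any]] = []
--     for is_head, run in groupby(lines, key=_is_heading):
--         if is_head:
--             sections.extend(
--                 {"type": "heading", "content": l, "title": l} for l in run
--             )
--         else:
--             sections.append(
--                 {"type": "paragraph", "content": " ".join(run) + " "}
--             )
--     return sections
-- ===== Notes on version B (the rewrite author's own statement) =====
-- stated objective: alternative
-- what changed: Replaces A's accumulate-and-flush state machine (a mutable current-paragraph section flushed whenever a heading or the end of input is seen) with a classify-then-group pass: strip and drop blank lines once, then itertools.groupby over the heading/non-heading classification, emitting each heading as its own section and each maximal non-heading run as one joined paragraph.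
import Mathlib
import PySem

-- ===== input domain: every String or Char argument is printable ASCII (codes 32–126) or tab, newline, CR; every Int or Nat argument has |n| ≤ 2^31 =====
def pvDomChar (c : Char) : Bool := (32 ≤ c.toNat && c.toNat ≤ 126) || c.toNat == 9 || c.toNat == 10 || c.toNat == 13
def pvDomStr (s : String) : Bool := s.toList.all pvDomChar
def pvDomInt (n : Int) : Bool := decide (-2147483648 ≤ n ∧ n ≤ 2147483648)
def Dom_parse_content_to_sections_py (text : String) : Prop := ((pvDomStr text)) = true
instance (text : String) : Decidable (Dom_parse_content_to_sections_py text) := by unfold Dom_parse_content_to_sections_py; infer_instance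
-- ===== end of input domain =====

-- B replaces A's accumulate-and-flush state machine by a classify-then-group pass
-- (strip/filter the lines once, then group consecutive lines by the same heading test); objective: alternative decomposition, same cost.

-- ===== PORT A =====
-- shared primitive: str.isupper() (exact on the ASCII domain, where cased characters are exactly the letters)
def pvStrIsupper (s : String) : Bool :=
  s.toList.any PySem.Chars.isalpha && s.toList.all (fun c => !PySem.Chars.islower c)

-- the heading test, with the Python condition's unparenthesised precedence kept:
-- (len(line) < 100 and line.isupper()) or (len(line.split()) <= 8 and not line.endswith("."))
def pvIsHeading (line : String) : Bool :=
  (decide (PySem.Str.len line < 100) && pvStrIsupper line) ||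
  (decide ((PySem.Str.split₀ line).length ≤ 8) && !PySem.Str.endswith line ".")

def pvHeadSec (line : String) : List (String × String) :=
  [("type", "heading"), ("content", line), ("title", line)]

def pvParaSec (c : String) : List (String × String) :=
  [("type", "paragraph"), ("content", c)]

-- 'if current_section["content"].strip(): sections.append(current_section)'
def pvFlushA (secs : List (List (String × String))) (cur : String) : List (List (String × String)) :=
  if PySem.Str.strip cur = "" then secs else secs ++ [pvParaSec cur]

-- A's loop body after the blank-line 'continue'
def pvCleanStepA (st : List (List (String × String)) × String) (line : String) :
    List (List (String × String)) × String :=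
  if pvIsHeading line then (pvFlushA st.1 st.2 ++ [pvHeadSec line], "")
  else (st.1, st.2 ++ line ++ " ")

def pvStepA (st : List (List (String × String)) × String) (raw : String) :
    List (List (String × String)) × String :=
  let line := PySem.Str.strip raw
  if line = "" then st else pvCleanStepA st line

def parse_content_to_sections_py (text : String) : List (List (String × String)) :=
  -- text.split("\n"); the separator is nonempty, so split? is always `some`
  let lines := (PySem.Str.split? text "\n").getD []
  let st := lines.foldl pvStepA ([], "")
  pvFlushA st.1 st.2

-- ===== PORT B =====
-- itertools.groupby over the stripped non-blank lines, keyed by the heading test: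
-- a heading emits its own section; a maximal non-heading run becomes one paragraph.
def pvGroupB : List String → List (List (String × String))
  | [] => []
  | l :: rest =>
    if pvIsHeading l then pvHeadSec l :: pvGroupB rest
    else
      pvParaSec (PySem.Str.join " " (l :: rest.takeWhile (fun x => !pvIsHeading x)) ++ " ")
        :: pvGroupB (rest.dropWhile (fun x => !pvIsHeading x))
termination_by ls => ls.length
decreasing_by
  · simp
  · have := List.length_dropWhile_le (fun x => !pvIsHeading x) rest
    simp
    omega

def parse_content_to_sections_py_alt (text : String) : List (List (String × String)) :=
  let lines := (((PySem.Str.split? text "\n").getD []).map PySem.Str.strip).filter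
    (fun s => decide (s ≠ ""))
  pvGroupB lines

-- ===== PRECONDITION & SPEC =====
def Spec_parse_content_to_sections_py (text : String) (out : List (List (String × String))) : Prop := out = parse_content_to_sections_py_alt text
instance (text : String) (out : List (List (String × String))) : Decidable (Spec_parse_content_to_sections_py text out) := by unfold Spec_parse_content_to_sections_py; infer_instance

-- ===== CLAIM (what is proved, stated in full; the proofs are below) =====
def Claim_equal_parse_content_to_sections_py : Prop := ∀ (text : String), Dom_parse_content_to_sections_py text → Spec_parse_content_to_sections_py text (parse_content_to_sections_py text)

-- ===== LEMMAS AND PROOFS =====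

-- A's paragraph accumulator: what current_section["content"] holds after a run of lines
def pvConcat (run : List String) : String := run.foldl (fun a x => a ++ x ++ " ") ""

-- intermediate form of B: pvGroupB with an explicit pending paragraph run
def pvEmit : List String → List String → List (List (String × String))
  | run, [] => if run = [] then [] else [pvParaSec (pvConcat run)]
  | run, l :: ls =>
    if pvIsHeading l then
      (if run = [] then [] else [pvParaSec (pvConcat run)]) ++ pvHeadSec l :: pvEmit [] ls
    else pvEmit (run ++ [l]) ls

-- a stripped non-blank line: starts with a non-space character
def pvGood (x : String) : Prop :=
  ∃ c t, x.toList = c :: t ∧ PySem.Chars.isspace c = false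

theorem pvGroupB_nil : pvGroupB [] = [] := by
  rw [pvGroupB.eq_def]

theorem pvGroupB_cons (l : String) (rest : List String) :
    pvGroupB (l :: rest)
      = if pvIsHeading l then pvHeadSec l :: pvGroupB rest
        else
          pvParaSec (PySem.Str.join " " (l :: rest.takeWhile (fun x => !pvIsHeading x)) ++ " ")
            :: pvGroupB (rest.dropWhile (fun x => !pvIsHeading x)) := by
  rw [pvGroupB.eq_def]

theorem pvStrExt {a b : String} (h : a.toList = b.toList) : a = b :=
  String.ext (by simpa using h)

theorem pvDwHead {α : Type} {p : α → Bool} :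
    ∀ (l : List α) (c : α) (t : List α), List.dropWhile p l = c :: t → p c = false := by
  intro l
  induction l with
  | nil => intro c t h; simp [List.dropWhile] at h
  | cons a l ih =>
    intro c t h
    rw [List.dropWhile_cons] at h
    split at h
    · exact ih _ _ h
    · cases h; exact Bool.eq_false_iff.mpr ‹¬ _›

theorem pvRstripCons (c : Char) (t : List Char) (hc : PySem.Chars.isspace c = false) :
    ∃ w, PySem.Chars.rstrip (c :: t) = c :: w := by
  unfold PySem.Chars.rstrip
  rw [show (c :: t).reverse = t.reverse ++ [c] by simp, List.dropWhile_append]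
  split
  · exact ⟨[], by simp [hc]⟩
  · exact ⟨(List.dropWhile PySem.Chars.isspace t.reverse).reverse, by simp⟩

theorem pvGood_strip (raw : String) (h : PySem.Str.strip raw ≠ "") :
    pvGood (PySem.Str.strip raw) := by
  have hne : PySem.Chars.strip raw.toList ≠ [] := by
    intro h0
    exact h (pvStrExt (by simp [h0]))
  unfold PySem.Chars.strip at hne
  cases hL : PySem.Chars.lstrip raw.toList with
  | nil => rw [hL] at hne; simp [PySem.Chars.rstrip] at hne
  | cons c t =>
    have hc : PySem.Chars.isspace c = false := pvDwHead raw.toList c t hL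
    obtain ⟨w, hw⟩ := pvRstripCons c t hc
    exact ⟨c, w, by simp [PySem.Chars.strip, hL, hw], hc⟩

theorem pvStripAppend (x r : String) (hg : pvGood x) : PySem.Str.strip (x ++ r) ≠ "" := by
  obtain ⟨c, t, hx, hc⟩ := hg
  intro h0
  have h1 : PySem.Chars.strip ((x ++ r).toList) = [] := by
    rw [← PySem.Str.toList_strip, h0]; rfl
  rw [String.toList_append, hx] at h1
  unfold PySem.Chars.strip PySem.Chars.lstrip at h1
  rw [show (c :: t ++ r.toList) = c :: (t ++ r.toList) by simp, List.dropWhile_cons, hc] at h1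
  simp at h1
  obtain ⟨w, hw⟩ := pvRstripCons c (t ++ r.toList) hc
  rw [hw] at h1
  simp at h1

theorem pvConcatPre : ∀ (xs : List String) (c : String),
    ∃ r, xs.foldl (fun a x => a ++ x ++ " ") c = c ++ r := by
  intro xs
  induction xs with
  | nil => exact fun c => ⟨"", by simp⟩
  | cons b xs ih =>
    intro c
    obtain ⟨r, hr⟩ := ih (c ++ b ++ " ")
    refine ⟨b ++ " " ++ r, ?_⟩
    simp only [List.foldl_cons]
    rw [hr]
    simp [String.append_assoc]

theorem pvConcat_cons (x : String) (rest : List String) :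
    ∃ r, pvConcat (x :: rest) = x ++ r := by
  obtain ⟨r, hr⟩ := pvConcatPre rest ("" ++ x ++ " ")
  refine ⟨" " ++ r, ?_⟩
  simp only [pvConcat, List.foldl_cons]
  rw [hr]
  simp [String.append_assoc]

theorem pvStripConcat (run : List String) (hg : ∀ x ∈ run, pvGood x) :
    (PySem.Str.strip (pvConcat run) = "") ↔ run = [] := by
  cases run with
  | nil => simp [pvConcat]; decide
  | cons x rest =>
    obtain ⟨r, hr⟩ := pvConcat_cons x rest
    rw [hr]
    have := pvStripAppend x r (hg x (by simp))
    simp [this]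

theorem pvJoinSingle (x : String) : PySem.Str.join " " [x] = x :=
  pvStrExt (by simp [PySem.Str.toList_join, PySem.Chars.join_singleton])

theorem pvJoinCons (x y : String) (xs : List String) :
    PySem.Str.join " " (x :: y :: xs) = x ++ " " ++ PySem.Str.join " " (y :: xs) :=
  pvStrExt (by simp [PySem.Str.toList_join, PySem.Chars.join_cons_cons, String.toList_append])

theorem pvConcatJoin : ∀ (xs : List String) (x c : String),
    xs.foldl (fun a b => a ++ b ++ " ") (c ++ x ++ " ")
      = c ++ (PySem.Str.join " " (x :: xs) ++ " ") := by
  intro xs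
  induction xs with
  | nil => intro x c; simp [pvJoinSingle, String.append_assoc]
  | cons y xs ih =>
    intro x c
    rw [List.foldl_cons, ih y (c ++ x ++ " "), pvJoinCons]
    simp [String.append_assoc]

theorem pvConcat_eq_join (x : String) (xs : List String) :
    pvConcat (x :: xs) = PySem.Str.join " " (x :: xs) ++ " " := by
  have := pvConcatJoin xs x ""
  simpa [pvConcat, List.foldl_cons] using this

theorem pvL1 : ∀ (ls run : List String) (secs : List (List (String × String))),
    (∀ x ∈ run, pvGood x) → (∀ x ∈ ls, pvGood x) →
    pvFlushA (ls.foldl pvCleanStepA (secs, pvConcat run)).1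
        (ls.foldl pvCleanStepA (secs, pvConcat run)).2
      = secs ++ pvEmit run ls := by
  intro ls
  induction ls with
  | nil =>
    intro run secs hrun _
    simp only [List.foldl_nil, pvFlushA, pvEmit]
    by_cases h : run = []
    · subst h; simp [pvConcat]; decide
    · rw [if_neg (by simpa [pvStripConcat run hrun] using h), if_neg h]
  | cons l ls ih =>
    intro run secs hrun hls
    have hl : pvGood l := hls l (by simp)
    have hls' : ∀ x ∈ ls, pvGood x := fun x hx => hls x (by simp [hx])
    simp only [List.foldl_cons]
    by_cases hh : pvIsHeading l = true
    · rw [show pvCleanStepA (secs, pvConcat run) l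
          = (pvFlushA secs (pvConcat run) ++ [pvHeadSec l], pvConcat []) by
        simp [pvCleanStepA, hh]; rfl]
      rw [ih [] _ (by simp) hls']
      have hflush : pvFlushA secs (pvConcat run)
          = secs ++ (if run = [] then [] else [pvParaSec (pvConcat run)]) := by
        by_cases h : run = []
        · subst h; simp [pvFlushA, pvConcat]; decide
        · rw [pvFlushA, if_neg (by simpa [pvStripConcat run hrun] using h), if_neg h]
      rw [hflush]
      simp [pvEmit, hh]
    · rw [show pvCleanStepA (secs, pvConcat run) l = (secs, pvConcat (run ++ [l])) by
        simp [pvCleanStepA, hh, pvConcat, List.foldl_append]]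
      rw [ih (run ++ [l]) secs (by intro x hx; rcases List.mem_append.1 hx with h | h
                                   · exact hrun x h
                                   · simp at h; subst h; exact hl) hls']
      simp [pvEmit, hh]

theorem pvL2a : ∀ (ls run : List String), run ≠ [] →
    pvEmit run ls
      = pvParaSec (pvConcat (run ++ ls.takeWhile (fun x => !pvIsHeading x)))
          :: pvEmit [] (ls.dropWhile (fun x => !pvIsHeading x)) := by
  intro ls
  induction ls with
  | nil => intro run hrun; simp [pvEmit, hrun]
  | cons l ls ih =>
    intro run hrun
    by_cases hh : pvIsHeading l = true
    · simp [pvEmit, hh, hrun]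
    · rw [show pvEmit run (l :: ls) = pvEmit (run ++ [l]) ls by simp [pvEmit, hh]]
      rw [ih (run ++ [l]) (by simp)]
      simp [hh]

theorem pvL2 : ∀ (n : Nat) (ls : List String), ls.length ≤ n →
    pvEmit [] ls = pvGroupB ls := by
  intro n
  induction n with
  | zero =>
    intro ls h
    have : ls = [] := by cases ls <;> simp_all
    subst this
    simp [pvEmit, pvGroupB_nil]
  | succ n ih =>
    intro ls h
    cases ls with
    | nil => simp [pvEmit, pvGroupB_nil]
    | cons l ls =>
      simp only [List.length_cons, Nat.add_le_add_iff_right] at h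
      by_cases hh : pvIsHeading l = true
      · rw [show pvEmit [] (l :: ls) = pvHeadSec l :: pvEmit [] ls by simp [pvEmit, hh]]
        rw [ih ls h, pvGroupB_cons, if_pos hh]
      · rw [show pvEmit [] (l :: ls) = pvEmit [l] ls by simp [pvEmit, hh]]
        rw [pvL2a ls [l] (by simp)]
        rw [ih (ls.dropWhile (fun x => !pvIsHeading x))
            (le_trans (List.length_dropWhile_le _ _) h)]
        rw [pvGroupB_cons, if_neg (by simp [hh])]
        rw [show ([l] : List String) ++ ls.takeWhile (fun x => !pvIsHeading x)
            = l :: ls.takeWhile (fun x => !pvIsHeading x) by simp]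
        rw [pvConcat_eq_join]

-- ===== VERDICT (by name: the statement is the Claim_ definition above) =====
theorem parse_content_to_sections_py_spec : Claim_equal_parse_content_to_sections_py := by
  intro text _hdom
  unfold Spec_parse_content_to_sections_py
  unfold parse_content_to_sections_py parse_content_to_sections_py_alt
  simp only []
  set lines := (PySem.Str.split? text "\n").getD [] with hlines
  set ls' := (lines.map PySem.Str.strip).filter (fun s => decide (s ≠ "")) with hls'
  have h1 : lines.foldl pvStepA ([], "") = ls'.foldl pvCleanStepA ([], "") := by
    calc lines.foldl pvStepA ([], "")
        = lines.foldl (fun st raw =>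
            if ¬(PySem.Str.strip raw = "") then pvCleanStepA st (PySem.Str.strip raw)
            else st) ([], "") := by
          apply PySem.List.foldl_congr_mem
          intro acc x _
          by_cases h : PySem.Str.strip x = "" <;> simp [pvStepA, h]
      _ = (lines.map PySem.Str.strip).foldl
            (fun st l => if ¬(l = "") then pvCleanStepA st l else st) ([], "") := by
          rw [List.foldl_map]
      _ = ls'.foldl pvCleanStepA ([], "") := by
          rw [hls']
          exact PySem.List.foldl_ite_eq_foldl_filter (fun l => ¬(l = "")) pvCleanStepA _ _
  have hgood : ∀ x ∈ ls', pvGood x := by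
    intro x hx
    rw [hls'] at hx
    obtain ⟨hmem, hne⟩ := List.mem_filter.1 hx
    obtain ⟨raw, _, hraw⟩ := List.mem_map.1 hmem
    subst hraw
    exact pvGood_strip raw (by simpa using hne)
  rw [h1]
  have h2 := pvL1 ls' [] [] (by simp) hgood
  rw [show (([], "") : List (List (String × String)) × String) = ([], pvConcat []) from rfl]
  rw [h2, pvL2 ls'.length ls' le_rfl]
  simp
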